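-- pv_equiv track=rewrite | github.com/CDANIEL0123/Programming_Practice | 프로그래머스/0/120864. 숨어있는 숫자의 덧셈 （2）/숨어있는 숫자의 덧셈 （2）.py | solution
-- ===== SOURCE A (Python) =====
-- def solution(my_string):
--     answer = 0
--     num = ['1','2','3','4','5','6','7','8','9','0']
--     my_num=''
--
--     for i in range(len(my_string)) :
--         if my_string[i] in num :
--             my_num += my_string[i]
--             if i == len(my_string)-1:
--                     answer+=int(my_num)
--                     my_num=''
--
--         else  :
--             if my_num != '' :
--                 answer+=int(my_num)
--                 my_num=''
--     return answer
-- ===== SOURCE B (Python) =====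
-- def solution(my_string):
--     # Mask every non-digit to a space, then split into maximal digit groups and sum them.
--     masked = ''.join(c if '0' <= c <= '9' else ' ' for c in my_string)
--     return sum(int(g) for g in masked.split())
-- ===== Notes on version B (the rewrite author's own statement) =====
-- stated objective: idiomatic
-- what changed: Replaces A's index-driven per-character buffer-and-flush state machine (with a special flush at the last index) by masking non-digits to spaces, splitting once into maximal digit groups and summing int over them.
import Mathlib
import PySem

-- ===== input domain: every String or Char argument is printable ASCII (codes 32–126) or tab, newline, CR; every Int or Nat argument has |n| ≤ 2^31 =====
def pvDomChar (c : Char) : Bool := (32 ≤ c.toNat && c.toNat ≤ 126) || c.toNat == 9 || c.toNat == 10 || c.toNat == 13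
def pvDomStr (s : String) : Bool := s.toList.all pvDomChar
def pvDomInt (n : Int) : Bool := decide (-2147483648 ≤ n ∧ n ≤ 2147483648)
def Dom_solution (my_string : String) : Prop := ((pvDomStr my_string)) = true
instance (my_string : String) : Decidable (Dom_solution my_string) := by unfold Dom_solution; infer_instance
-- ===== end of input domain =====

-- B masks non-digits to spaces, splits into maximal digit groups and sums them,
-- instead of A's index-driven buffer-and-flush state machine (objective: idiomatic; same O(n) cost).

-- ===== PORT A =====
-- num = ['1','2','3','4','5','6','7','8','9','0']
def digitsA : List Char := ['1', '2', '3', '4', '5', '6', '7', '8', '9', '0']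

-- one iteration of A's loop body; state = (answer, my_num as chars).
-- int(my_num) is only reached with my_num a nonempty digit string, where ofChars? is some; .getD 0 totalizes.
def solutionStep (cs : List Char) (n : Int) (st : Int × List Char) (i : Int) : Int × List Char :=
  (PySem.List.pyGet? cs i).elim st (fun ch =>
    if digitsA.contains ch then
      let buf := st.2 ++ [ch]
      if i = n - 1 then (st.1 + (PySem.Int.ofChars? buf).getD 0, [])
      else (st.1, buf)
    else
      if st.2 ≠ [] then (st.1 + (PySem.Int.ofChars? st.2).getD 0, [])
      else st)

def solution (my_string : String) : Int :=
  ((PySem.List.pyRange 0 (PySem.Str.len my_string) 1).foldl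
      (solutionStep my_string.toList (PySem.Str.len my_string)) (0, [])).1

-- ===== PORT B =====
def solution_alt (my_string : String) : Int :=
  let masked := String.ofList (my_string.toList.map (fun c => if '0' ≤ c ∧ c ≤ '9' then c else ' '))
  ((PySem.Str.split₀ masked).map (fun g => (PySem.Int.ofStr? g).getD 0)).sum

-- ===== PRECONDITION & SPEC =====
def Spec_solution (my_string : String) (out : Int) : Prop := out = solution_alt my_string
instance (my_string : String) (out : Int) : Decidable (Spec_solution my_string out) := by unfold Spec_solution; infer_instance

-- ===== CLAIM (what is proved, stated in full; the proofs are below) =====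
def Claim_equal_solution : Prop := ∀ (my_string : String), Dom_solution my_string → Spec_solution my_string (solution my_string)

-- ===== LEMMAS AND PROOFS =====

def isDig (c : Char) : Bool := decide ('0' ≤ c ∧ c ≤ '9')

def maskC (c : Char) : Char := if '0' ≤ c ∧ c ≤ '9' then c else ' '

def intOf (g : List Char) : Int := (PySem.Int.ofChars? g).getD 0

-- reference grouping, A-style (flush happens at the last digit)
def G (buf : List Char) : List Char → List (List Char)
  | [] => []
  | c :: r =>
      if isDig c then (if r = [] then [buf ++ [c]] else G (buf ++ [c]) r)
      else if buf = [] then G [] r else buf :: G [] r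

-- reference grouping, B-style (flush at the end of input)
def G2 (buf : List Char) : List Char → List (List Char)
  | [] => if buf = [] then [] else [buf]
  | c :: r =>
      if isDig c then G2 (buf ++ [c]) r
      else if buf = [] then G2 [] r else buf :: G2 [] r

theorem mem_digitsA_iff (c : Char) : digitsA.contains c = isDig c := by
  have he : ∀ d : Char, (c = d) ↔ (c.toNat = d.toNat) := by
    intro d
    constructor
    · intro h; rw [h]
    · intro h; apply Char.ext; apply UInt32.toNat_inj.mp; exact h
  have hle : ('0' ≤ c ∧ c ≤ '9') ↔ (48 ≤ c.toNat ∧ c.toNat ≤ 57) := by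
    rw [Char.le_def, Char.le_def, UInt32.le_iff_toNat_le, UInt32.le_iff_toNat_le]
    exact Iff.rfl
  simp only [digitsA, List.contains, List.elem_eq_mem, List.mem_cons, List.not_mem_nil, or_false,
    isDig, decide_eq_decide, he, hle]
  have h1 : ('1' : Char).toNat = 49 := rfl
  have h2 : ('2' : Char).toNat = 50 := rfl
  have h3 : ('3' : Char).toNat = 51 := rfl
  have h4 : ('4' : Char).toNat = 52 := rfl
  have h5 : ('5' : Char).toNat = 53 := rfl
  have h6 : ('6' : Char).toNat = 54 := rfl
  have h7 : ('7' : Char).toNat = 55 := rfl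
  have h8 : ('8' : Char).toNat = 56 := rfl
  have h9 : ('9' : Char).toNat = 57 := rfl
  have h0 : ('0' : Char).toNat = 48 := rfl
  rw [h1, h2, h3, h4, h5, h6, h7, h8, h9, h0]
  omega

theorem isspace_of_isDig (c : Char) (h : isDig c = true) : PySem.Chars.isspace c = false := by
  simp only [isDig, decide_eq_true_eq] at h
  rw [Char.le_def, Char.le_def, UInt32.le_iff_toNat_le, UInt32.le_iff_toNat_le] at h
  have h48 : 48 ≤ c.toNat := h.1
  have h57 : c.toNat ≤ 57 := h.2
  simp only [PySem.Chars.isspace]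
  simp only [Bool.or_eq_false_iff, Bool.and_eq_false_iff, decide_eq_false_iff_not]
  omega

-- ---- A-side: the pyRange fold computes sums over A-style groups ----

theorem foldA (cs : List Char) : ∀ (pre : List Char) (ans : Int) (buf : List Char),
    ((PySem.List.pyRange (pre.length : Int) ((pre.length + cs.length : Nat) : Int) 1).foldl
        (solutionStep (pre ++ cs) ((pre.length + cs.length : Nat) : Int)) (ans, buf)).1
      = ans + ((G buf cs).map intOf).sum := by
  induction cs with
  | nil =>
      intro pre ans buf
      rw [PySem.List.pyRange_one_eq_nil (by simp)]
      simp [G]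
  | cons c r ih =>
      intro pre ans buf
      have hlt : (pre.length : Int) < ((pre.length + (c :: r).length : Nat) : Int) := by
        simp only [List.length_cons]; push_cast; omega
      rw [PySem.List.pyRange_one_cons hlt, List.foldl_cons]
      simp only [solutionStep, PySem.List.pyGet?_append_length, Option.elim, mem_digitsA_iff]
      by_cases hd : isDig c
      · by_cases hr : r = []
        · subst hr
          have hcond : ((pre.length : Int) = ((pre.length + ([c] : List Char).length : Nat) : Int) - 1) := by
            simp only [List.length_cons, List.length_nil]; omega
          rw [if_pos hd, if_pos hcond, PySem.List.pyRange_one_eq_nil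
            (by simp only [List.length_cons, List.length_nil]; omega)]
          simp [G, hd, intOf]
        · have hlen : r.length ≠ 0 := by simpa using hr
          have hcond : ¬ ((pre.length : Int) = ((pre.length + (c :: r).length : Nat) : Int) - 1) := by
            simp only [List.length_cons]; push_cast; omega
          rw [if_pos hd, if_neg hcond]
          have hre : pre ++ c :: r = (pre ++ [c]) ++ r := by simp
          have hl1 : ((pre.length : Int) + 1) = ((pre ++ [c]).length : Int) := by simp
          have hl2 : ((pre.length + (c :: r).length : Nat) : Int) = (((pre ++ [c]).length + r.length : Nat) : Int) := by
            push_cast; simp; omega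
          rw [hre, hl1, hl2, ih (pre ++ [c]) ans (buf ++ [c])]
          simp [G, hd, hr]
      · rw [if_neg hd]
        have hre : pre ++ c :: r = (pre ++ [c]) ++ r := by simp
        have hl1 : ((pre.length : Int) + 1) = ((pre ++ [c]).length : Int) := by simp
        have hl2 : ((pre.length + (c :: r).length : Nat) : Int) = (((pre ++ [c]).length + r.length : Nat) : Int) := by
          push_cast; simp; omega
        rw [hre, hl1, hl2]
        by_cases hb : buf = []
        · rw [if_neg (by simp [hb])]
          rw [ih (pre ++ [c]) ans buf]
          simp [G, hd, hb]
        · rw [if_pos (by simp [hb])]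
          rw [ih (pre ++ [c]) _ []]
          simp [G, hd, hb, intOf]
          ring

theorem solution_eq_G (s : String) :
    solution s = ((G [] s.toList).map intOf).sum := by
  unfold solution
  rw [PySem.Str.len_eq]
  simpa using foldA s.toList [] 0 []

-- ---- B-side: split₀ of the masked string computes B-style groups ----

theorem go_spec (cs : List Char) : ∀ (cur : List Char) (acc : List (List Char)),
    PySem.Chars.split₀.go (cs.map maskC) cur acc = acc.reverse ++ G2 cur.reverse cs := by
  induction cs with
  | nil =>
      intro cur acc
      show (if cur.isEmpty = true then acc.reverse else (cur.reverse :: acc).reverse)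
        = acc.reverse ++ G2 cur.reverse []
      by_cases hc : cur = [] <;> simp [hc, G2]
  | cons c r ih =>
      intro cur acc
      show (if PySem.Chars.isspace (maskC c) = true then
              if cur.isEmpty = true then PySem.Chars.split₀.go (r.map maskC) [] acc
              else PySem.Chars.split₀.go (r.map maskC) [] (cur.reverse :: acc)
            else PySem.Chars.split₀.go (r.map maskC) (maskC c :: cur) acc)
        = acc.reverse ++ G2 cur.reverse (c :: r)
      by_cases hd : isDig c
      · have hm : maskC c = c := by
          simp only [isDig, decide_eq_true_eq] at hd; simp [maskC, hd]
        rw [hm, isspace_of_isDig c hd]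
        simp only [Bool.false_eq_true, if_false]
        rw [ih (c :: cur) acc]
        simp [G2, hd]
      · have hm : maskC c = ' ' := by
          simp only [isDig, decide_eq_true_eq] at hd; simp [maskC, hd]
        rw [hm]
        have : PySem.Chars.isspace ' ' = true := rfl
        rw [this]
        simp only [if_true]
        by_cases hc : cur = []
        · simp only [hc, List.isEmpty_nil, if_true]
          rw [ih [] acc]
          simp [G2, hd]
        · have : cur.isEmpty = false := by simp [hc]
          rw [this]
          simp only [Bool.false_eq_true, if_false]
          rw [ih [] (cur.reverse :: acc)]
          simp [G2, hd, hc]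

theorem solution_alt_eq_G2 (s : String) :
    solution_alt s = ((G2 [] s.toList).map intOf).sum := by
  unfold solution_alt
  simp only [PySem.Str.split₀, PySem.Chars.split₀, String.toList_ofList, List.map_map]
  have hmask : s.toList.map (fun c => if '0' ≤ c ∧ c ≤ '9' then c else ' ') = s.toList.map maskC := by
    simp [maskC]
  rw [hmask, go_spec s.toList [] []]
  simp only [List.reverse_nil, List.nil_append]
  congr 1
  apply List.map_congr_left
  intro g _
  simp [Function.comp, PySem.Int.ofStr?_ofList, intOf]

-- ---- the two groupings agree ----

theorem G_eq_G2 (cs : List Char) : ∀ buf : List Char, buf = [] ∨ cs ≠ [] →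
    G buf cs = G2 buf cs := by
  induction cs with
  | nil =>
      rintro buf (hb | hb)
      · simp [hb, G, G2]
      · exact absurd rfl hb
  | cons c r ih =>
      intro buf _
      by_cases hd : isDig c
      · by_cases hr : r = []
        · subst hr; simp [G, G2, hd]
        · simp only [G, G2, hd, if_true, if_neg hr]
          exact ih (buf ++ [c]) (Or.inr hr)
      · simp only [G, G2, hd, Bool.false_eq_true, if_false]
        by_cases hb : buf = []
        · simp only [hb, if_true]
          exact ih [] (Or.inl rfl)
        · simp only [if_neg hb]
          rw [ih [] (Or.inl rfl)]

-- ===== VERDICT (by name: the statement is the Claim_ definition above) =====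
theorem solution_spec : Claim_equal_solution := by
  intro s _
  unfold Spec_solution
  rw [solution_eq_G, solution_alt_eq_G2, G_eq_G2 s.toList [] (Or.inl rfl)]
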